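-- pv_equiv track=rewrite | github.com/TerryHank/simple_lashingrobot_ws | src/tie_robot_web/scripts/workspace_picker_web_server.py | replace_top_level_yaml_block
-- ===== SOURCE A (Python) =====
-- def replace_top_level_yaml_block(existing_text, block_name, replacement_block):
--     lines = existing_text.splitlines()
--     block_header = f"{block_name}:"
--     start_index = None
--     for index, line in enumerate(lines):
--         if line.strip() == block_header and line == line.lstrip():
--             start_index = index
--             break
--
--     if start_index is None:
--         prefix = existing_text.rstrip()
--         separator = "\n\n" if prefix else ""
--         return f"{prefix}{separator}{replacement_block}\n"
--
--     end_index = start_index + 1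
--     while end_index < len(lines):
--         line = lines[end_index]
--         is_top_level = line.strip() and line == line.lstrip()
--         if is_top_level and not line.lstrip().startswith("#"):
--             break
--         end_index += 1
--
--     merged_lines = (
--         lines[:start_index]
--         + replacement_block.splitlines()
--         + lines[end_index:]
--     )
--     return "\n".join(merged_lines).rstrip() + "\n"
-- ===== SOURCE B (Python) =====
-- def replace_top_level_yaml_block(existing_text, block_name, replacement_block):
--     # One-pass state machine over the lines: emit lines while searching,
--     # emit the replacement at the header, swallow the old block, copy the rest.
--     header = block_name + ":"
--     out = []
--     state = 0  # 0 = searching for header, 1 = skipping old block, 2 = copying tail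
--     for line in existing_text.splitlines():
--         if state == 0:
--             if line.strip() == header and line == line.lstrip():
--                 out.extend(replacement_block.splitlines())
--                 state = 1
--             else:
--                 out.append(line)
--         elif state == 1:
--             if line.strip() and line == line.lstrip() and not line.lstrip().startswith("#"):
--                 out.append(line)
--                 state = 2
--         else:
--             out.append(line)
--     if state == 0:
--         prefix = existing_text.rstrip()
--         separator = "\n\n" if prefix else ""
--         return prefix + separator + replacement_block + "\n"
--     return "\n".join(out).rstrip() + "\n"
-- ===== Notes on version B (the rewrite author's own statement) =====
-- stated objective: alternative
-- what changed: A does staged passes over indices (find header index with a break loop, find the block end with a while loop, then splice by list slicing); B is a single pass over the lines with a 3-state machine accumulator that emits, substitutes and skips lines as it goes, never using indices or slices.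
import Mathlib
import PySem

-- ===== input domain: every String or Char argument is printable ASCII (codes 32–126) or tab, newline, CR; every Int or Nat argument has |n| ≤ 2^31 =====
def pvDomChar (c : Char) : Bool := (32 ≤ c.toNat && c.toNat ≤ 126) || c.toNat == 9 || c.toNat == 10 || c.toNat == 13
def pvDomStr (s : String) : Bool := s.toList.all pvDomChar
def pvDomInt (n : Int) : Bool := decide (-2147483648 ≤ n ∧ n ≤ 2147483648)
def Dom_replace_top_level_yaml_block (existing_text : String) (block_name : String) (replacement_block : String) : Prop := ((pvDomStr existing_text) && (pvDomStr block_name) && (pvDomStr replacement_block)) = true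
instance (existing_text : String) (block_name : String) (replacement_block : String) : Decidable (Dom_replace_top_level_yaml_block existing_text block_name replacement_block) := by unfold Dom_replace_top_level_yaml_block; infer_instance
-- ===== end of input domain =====

-- B replaces A's staged index searches (break loop for the header, while loop for the
-- block end, then list slicing) by a single pass over the lines with a 3-state machine
-- accumulator (alternative decomposition; same output).

-- ===== PORT A =====
-- line.strip() == header and line == line.lstrip()
def pvHdrMatch (header : String) (l : String) : Bool :=
  (PySem.Str.strip l == header) && (l == PySem.Str.lstrip l)

-- line.strip() and line == line.lstrip() and not line.lstrip().startswith("#")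
def pvIsBoundary (l : String) : Bool :=
  (PySem.Str.strip l != "") && (l == PySem.Str.lstrip l)
    && !(PySem.Str.startswith (PySem.Str.lstrip l) "#")

-- A's first loop: enumerate with break
def pvFindStartA (header : String) : Nat → List String → Option Nat
  | _, [] => none
  | i, l :: ls => if pvHdrMatch header l then some i else pvFindStartA header (i + 1) ls

-- A's while loop advancing end_index
def pvFindEndA (lines : List String) (e : Nat) : Nat :=
  if h : e < lines.length then
    if pvIsBoundary lines[e] then e else pvFindEndA lines (e + 1)
  else e
termination_by lines.length - e

def replace_top_level_yaml_block (existing_text : String) (block_name : String) (replacement_block : String) : String :=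
  let lines := PySem.Str.splitlines existing_text
  let header := block_name ++ ":"
  match pvFindStartA header 0 lines with
  | none =>
      let pfx := PySem.Str.rstrip existing_text
      let sep := if pfx = "" then "" else "\n\n"
      pfx ++ sep ++ replacement_block ++ "\n"
  | some s =>
      let e := pvFindEndA lines (s + 1)
      let merged := PySem.List.slice lines none (some (s : Int))
        ++ PySem.Str.splitlines replacement_block
        ++ PySem.List.slice lines (some (e : Int)) none
      PySem.Str.rstrip (PySem.Str.join "\n" merged) ++ "\n"

-- ===== PORT B =====
-- B's single for-loop: state 0 = searching, 1 = skipping the old block, 2 = copying;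
-- returns the emitted lines and the final state.
def pvRunB (header : String) (repl : List String) : Nat → List String → List String × Nat
  | st, [] => ([], st)
  | st, l :: ls =>
      if st = 0 then
        if pvHdrMatch header l then
          let r := pvRunB header repl 1 ls
          (repl ++ r.1, r.2)
        else
          let r := pvRunB header repl 0 ls
          (l :: r.1, r.2)
      else if st = 1 then
        if pvIsBoundary l then
          let r := pvRunB header repl 2 ls
          (l :: r.1, r.2)
        else pvRunB header repl 1 ls
      else
        let r := pvRunB header repl 2 ls
        (l :: r.1, r.2)

def replace_top_level_yaml_block_alt (existing_text : String) (block_name : String) (replacement_block : String) : String :=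
  let header := block_name ++ ":"
  let res := pvRunB header (PySem.Str.splitlines replacement_block) 0 (PySem.Str.splitlines existing_text)
  if res.2 = 0 then
    let pfx := PySem.Str.rstrip existing_text
    let sep := if pfx = "" then "" else "\n\n"
    pfx ++ sep ++ replacement_block ++ "\n"
  else
    PySem.Str.rstrip (PySem.Str.join "\n" res.1) ++ "\n"

-- ===== PRECONDITION & SPEC =====
def Spec_replace_top_level_yaml_block (existing_text : String) (block_name : String) (replacement_block : String) (out : String) : Prop := out = replace_top_level_yaml_block_alt existing_text block_name replacement_block
instance (existing_text : String) (block_name : String) (replacement_block : String) (out : String) : Decidable (Spec_replace_top_level_yaml_block existing_text block_name replacement_block out) := by unfold Spec_replace_top_level_yaml_block; infer_instance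

-- ===== CLAIM (what is proved, stated in full; the proofs are below) =====
def Claim_equal_replace_top_level_yaml_block : Prop := ∀ (existing_text : String) (block_name : String) (replacement_block : String), Dom_replace_top_level_yaml_block existing_text block_name replacement_block → Spec_replace_top_level_yaml_block existing_text block_name replacement_block (replace_top_level_yaml_block existing_text block_name replacement_block)

-- ===== LEMMAS AND PROOFS =====

-- final state is never 0 once the machine has left state 0
lemma pvRunB_snd_ne_zero (h : String) (r : List String) :
    ∀ (xs : List String) (st : Nat), st ≠ 0 → (pvRunB h r st xs).2 ≠ 0 := by
  intro xs
  induction xs with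
  | nil => intro st hst; simpa [pvRunB] using hst
  | cons l ls ih =>
      intro st hst
      simp only [pvRunB, if_neg hst]
      by_cases h1 : st = 1
      · rw [if_pos h1]
        by_cases hb : pvIsBoundary l
        · simpa [hb] using ih 2 (by omega)
        · simpa [hb] using ih 1 (by omega)
      · rw [if_neg h1]
        exact ih 2 (by omega)

-- state 2 copies everything
lemma pvRunB_two (h : String) (r : List String) :
    ∀ (xs : List String), pvRunB h r 2 xs = (xs, 2) := by
  intro xs
  induction xs with
  | nil => rfl
  | cons l ls ih => simp [pvRunB, ih]

-- state 1 on the suffix from e emits exactly the suffix from A's end index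
lemma pvRunB_one_drop (h : String) (r : List String) :
    ∀ (lines : List String) (e : Nat), e ≤ lines.length →
      (pvRunB h r 1 (lines.drop e)).1 = lines.drop (pvFindEndA lines e) := by
  intro lines e
  induction hn : lines.length - e using Nat.strong_induction_on generalizing e with
  | _ n ih => ?_
  intro he
  rw [pvFindEndA]
  by_cases hlt : e < lines.length
  · have hdrop : lines.drop e = lines[e] :: lines.drop (e + 1) :=
      List.drop_eq_getElem_cons hlt
    rw [hdrop, dif_pos hlt]
    by_cases hb : pvIsBoundary lines[e]
    · rw [if_pos hb, hdrop]
      simp [pvRunB, hb, pvRunB_two]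
    · have := ih (lines.length - (e + 1)) (by omega) (e + 1) rfl (by omega)
      simp [pvRunB, hb, this]
  · rw [dif_neg hlt]
    have : lines.drop e = [] := List.drop_eq_nil_of_le (by omega)
    simp [this, pvRunB]

-- the start search ignores its offset up to a shift
lemma pvFindStartA_map (h : String) : ∀ (ls : List String) (k : Nat),
    pvFindStartA h k ls = (pvFindStartA h 0 ls).map (· + k) := by
  intro ls
  induction ls with
  | nil => intro k; rfl
  | cons l ls ih =>
      intro k
      simp only [pvFindStartA]
      by_cases hm : pvHdrMatch h l
      · simp [hm]
      · rw [if_neg hm, if_neg hm, ih (k + 1), ih 1, Option.map_map]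
        congr 1
        funext x
        simp; omega

-- the end search shifts under cons
lemma pvFindEndA_cons (l : String) (ls : List String) :
    ∀ (e : Nat), pvFindEndA (l :: ls) (e + 1) = pvFindEndA ls e + 1 := by
  intro e
  induction hn : ls.length - e using Nat.strong_induction_on generalizing e with
  | _ n ih => ?_
  conv_lhs => rw [pvFindEndA]
  conv_rhs => rw [pvFindEndA]
  by_cases hlt : e < ls.length
  · have hlt' : e + 1 < (l :: ls).length := by simp; omega
    rw [dif_pos hlt, dif_pos hlt']
    have hg : (l :: ls)[e + 1] = ls[e] := by simp
    rw [hg]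
    by_cases hb : pvIsBoundary ls[e]
    · simp [hb]
    · rw [if_neg hb, if_neg hb]
      exact ih (ls.length - (e + 1)) (by omega) (e + 1) rfl
  · rw [dif_neg hlt, dif_neg (by simp; omega)]

-- header not found: the machine stays in state 0
lemma pvRunB_none (h : String) (r : List String) :
    ∀ (lines : List String), pvFindStartA h 0 lines = none →
      (pvRunB h r 0 lines).2 = 0 := by
  intro lines
  induction lines with
  | nil => intro _; rfl
  | cons l ls ih =>
      intro hnone
      simp only [pvFindStartA] at hnone
      by_cases hm : pvHdrMatch h l
      · simp [hm] at hnone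
      · rw [if_neg hm, pvFindStartA_map] at hnone
        have h0 : pvFindStartA h 0 ls = none := by
          cases hx : pvFindStartA h 0 ls <;> simp [hx] at hnone ⊢
        simp [pvRunB, hm, ih h0]

-- header found: the machine emits A's spliced lines and leaves state 0
lemma pvRunB_some (h : String) (r : List String) :
    ∀ (lines : List String) (s : Nat), pvFindStartA h 0 lines = some s →
      (pvRunB h r 0 lines).1
        = lines.take s ++ r ++ lines.drop (pvFindEndA lines (s + 1))
      ∧ (pvRunB h r 0 lines).2 ≠ 0 := by
  intro lines
  induction lines with
  | nil => intro s hs; simp [pvFindStartA] at hs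
  | cons l ls ih =>
      intro s hs
      simp only [pvFindStartA] at hs
      by_cases hm : pvHdrMatch h l
      · rw [if_pos hm] at hs
        injection hs with hs0
        subst hs0
        constructor
        · have := pvRunB_one_drop h r (l :: ls) 1 (by simp)
          simp only [List.drop_one, List.tail_cons] at this
          simp [pvRunB, hm, this]
        · have := pvRunB_snd_ne_zero h r ls 1 (by omega)
          simpa [pvRunB, hm] using this
      · rw [if_neg hm, pvFindStartA_map] at hs
        have hex : ∃ s0, pvFindStartA h 0 ls = some s0 ∧ s = s0 + 1 := by
          cases hx : pvFindStartA h 0 ls with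
          | none => rw [hx] at hs; simp at hs
          | some t =>
              rw [hx] at hs
              simp only [Option.map_some] at hs
              exact ⟨t, rfl, by injection hs with h; omega⟩
        obtain ⟨s0, hs0, hsum⟩ := hex
        obtain ⟨ih1, ih2⟩ := ih s0 hs0
        subst hsum
        constructor
        · rw [show s0 + 1 + 1 = (s0 + 1) + 1 from rfl, pvFindEndA_cons]
          simp [pvRunB, hm, ih1]
        · simpa [pvRunB, hm] using ih2

-- ===== VERDICT (by name: the statement is the Claim_ definition above) =====
theorem replace_top_level_yaml_block_spec : Claim_equal_replace_top_level_yaml_block := by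
  intro existing_text block_name replacement_block _
  unfold Spec_replace_top_level_yaml_block replace_top_level_yaml_block replace_top_level_yaml_block_alt
  dsimp only
  cases hs : pvFindStartA (block_name ++ ":") 0 (PySem.Str.splitlines existing_text) with
  | none =>
      have h0 := pvRunB_none (block_name ++ ":") (PySem.Str.splitlines replacement_block)
        (PySem.Str.splitlines existing_text) hs
      simp [h0]
  | some s =>
      obtain ⟨h1, h2⟩ := pvRunB_some (block_name ++ ":") (PySem.Str.splitlines replacement_block)
        (PySem.Str.splitlines existing_text) s hs
      simp [h1, h2, PySem.List.slice_to_natCast, PySem.List.slice_from_natCast]
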